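-- pv_equiv track=rewrite | github.com/elecaui/aui_2024 | Assignment1/day3:Perfectly Spherical Houses in a Vacuum.py | robosanta
-- ===== SOURCE A (Python) =====
-- def robosanta(instructions):
--     visied_locations = {(0, 0)}
--     santa_location = [0,0]
--     robosanta_location = [0,0]
--     santa_move = True
--
--     for instructions in instructions:
--         if santa_move == True:
--             current_locations = santa_location
--         else:
--             current_locations = robosanta_location
--
--         if instructions == '>':
--             current_locations[0] += 1
--         elif instructions == '<':
--             current_locations[0] -= 1
--         elif instructions == '^':
--             current_locations[1] += 1
--         elif instructions == 'v':
--             current_locations[1] -= 1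
--
--         visied_locations.add(tuple(current_locations))
--         santa_move = not santa_move
--
--     return len(visied_locations)
-- ===== SOURCE B (Python) =====
-- def _walk(steps):
--     x = y = 0
--     out = []
--     for c in steps:
--         if c == '>':
--             x += 1
--         elif c == '<':
--             x -= 1
--         elif c == '^':
--             y += 1
--         elif c == 'v':
--             y -= 1
--         out.append((x, y))
--     return out
--
--
-- def robosanta(instructions):
--     chars = list(instructions)
--     visited = {(0, 0)}
--     visited.update(_walk(chars[0::2]))
--     visited.update(_walk(chars[1::2]))
--     return len(visited)
-- ===== Notes on version B (the rewrite author's own statement) =====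
-- stated objective: alternative
-- what changed: Replaces A's single interleaved pass with a mover toggle and two mutable position lists by splitting the instruction list into even-index (santa) and odd-index (robosanta) substreams, walking each independently from (0,0), and taking the size of the merged visited set.
import Mathlib
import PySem

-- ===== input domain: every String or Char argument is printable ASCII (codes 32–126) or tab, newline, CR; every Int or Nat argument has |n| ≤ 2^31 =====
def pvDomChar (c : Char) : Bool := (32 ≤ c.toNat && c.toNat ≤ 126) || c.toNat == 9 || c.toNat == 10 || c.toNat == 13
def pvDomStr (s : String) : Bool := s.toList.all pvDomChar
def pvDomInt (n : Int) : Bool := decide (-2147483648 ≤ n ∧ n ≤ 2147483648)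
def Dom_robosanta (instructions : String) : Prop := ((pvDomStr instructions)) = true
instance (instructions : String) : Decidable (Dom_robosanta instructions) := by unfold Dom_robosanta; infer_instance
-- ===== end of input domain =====

-- B replaces A's interleaved single pass with a toggle by two independent parity-split walks
-- merged into one visited set (alternative decomposition; same asymptotic cost).


-- ===== PORT A =====
-- one loop iteration of A: pick the mover, apply the direction, add the tuple, toggle
def aBody (st : PySem.Set (Int × Int) × (Int × Int) × (Int × Int) × Bool) (c : Char) :
    PySem.Set (Int × Int) × (Int × Int) × (Int × Int) × Bool :=
  let cur := if st.2.2.2 then st.2.1 else st.2.2.1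
  let cur :=
    if c = '>' then (cur.1 + 1, cur.2)
    else if c = '<' then (cur.1 - 1, cur.2)
    else if c = '^' then (cur.1, cur.2 + 1)
    else if c = 'v' then (cur.1, cur.2 - 1)
    else cur
  let v := PySem.Set.add st.1 cur
  if st.2.2.2 then (v, cur, st.2.2.1, false) else (v, st.2.1, cur, true)

def robosanta (instructions : String) : Int :=
  let st := instructions.toList.foldl aBody ([((0 : Int), (0 : Int))], (0, 0), (0, 0), true)
  PySem.Set.len st.1

-- ===== PORT B =====
-- chars[0::2] / chars[1::2]: the step-2 slices, ported by hand (exact for these two slices)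
mutual
def evens : List Char → List Char
  | [] => []
  | c :: t => c :: odds t
def odds : List Char → List Char
  | [] => []
  | _ :: t => evens t
end

def stepPos (p : Int × Int) (c : Char) : Int × Int :=
  if c = '>' then (p.1 + 1, p.2)
  else if c = '<' then (p.1 - 1, p.2)
  else if c = '^' then (p.1, p.2 + 1)
  else if c = 'v' then (p.1, p.2 - 1)
  else p

-- _walk from (0,0): the list of positions after each step
def walk (p : Int × Int) : List Char → List (Int × Int)
  | [] => []
  | c :: t => let p' := stepPos p c; p' :: walk p' t

def robosanta_alt (instructions : String) : Int :=
  let chars := instructions.toList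
  let visited : PySem.Set (Int × Int) := [((0 : Int), (0 : Int))]
  let visited := PySem.Set.update visited (walk (0, 0) (evens chars))
  let visited := PySem.Set.update visited (walk (0, 0) (odds chars))
  PySem.Set.len visited

-- ===== PRECONDITION & SPEC =====
def Spec_robosanta (instructions : String) (out : Int) : Prop := out = robosanta_alt instructions
instance (instructions : String) (out : Int) : Decidable (Spec_robosanta instructions out) := by unfold Spec_robosanta; infer_instance

-- ===== CLAIM (what is proved, stated in full; the proofs are below) =====
def Claim_equal_robosanta : Prop := ∀ (instructions : String), Dom_robosanta instructions → Spec_robosanta instructions (robosanta instructions)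

-- ===== LEMMAS AND PROOFS =====

-- positions A's interleaved loop adds, starting from santa p, robo q, toggle b
def visitedL (p q : Int × Int) (b : Bool) : List Char → List (Int × Int)
  | [] => []
  | c :: t =>
    if b then stepPos p c :: visitedL (stepPos p c) q false t
    else stepPos q c :: visitedL p (stepPos q c) true t

lemma aBody_eq (V : PySem.Set (Int × Int)) (p q : Int × Int) (b : Bool) (c : Char) :
    aBody (V, p, q, b) c =
      if b then (PySem.Set.add V (stepPos p c), stepPos p c, q, false)
      else (PySem.Set.add V (stepPos q c), p, stepPos q c, true) := by
  cases b <;> simp [aBody, stepPos]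

lemma mem_foldA (l : List Char) :
    ∀ (V : PySem.Set (Int × Int)) (p q : Int × Int) (b : Bool) (x : Int × Int),
      x ∈ (l.foldl aBody (V, p, q, b)).1 ↔ x ∈ V ∨ x ∈ visitedL p q b l := by
  induction l with
  | nil => intro V p q b x; simp [visitedL]
  | cons c t ih =>
    intro V p q b x
    rw [List.foldl_cons, aBody_eq]
    cases b <;>
      simp only [if_true, if_false, Bool.false_eq_true, visitedL, ih,
        PySem.Set.mem_add, List.mem_cons] <;> tauto

lemma nodup_foldA (l : List Char) :
    ∀ (V : PySem.Set (Int × Int)) (p q : Int × Int) (b : Bool), V.Nodup →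
      (l.foldl aBody (V, p, q, b)).1.Nodup := by
  induction l with
  | nil => intro V p q b h; simpa using h
  | cons c t ih =>
    intro V p q b h
    rw [List.foldl_cons, aBody_eq]
    cases b <;> simp only [if_true, if_false, Bool.false_eq_true] <;>
      exact ih _ _ _ _ (PySem.Set.nodup_add _ _ h)

lemma mem_visitedL (l : List Char) :
    ∀ (p q : Int × Int) (b : Bool) (x : Int × Int),
      x ∈ visitedL p q b l ↔
        x ∈ walk (if b then p else q) (evens l) ∨ x ∈ walk (if b then q else p) (odds l) := by
  induction l with
  | nil => intro p q b x; simp [visitedL, evens, odds, walk]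
  | cons c t ih =>
    intro p q b x
    cases b <;>
      simp only [visitedL, evens, odds, walk, if_true, if_false, Bool.false_eq_true, List.mem_cons, ih] <;> tauto

theorem robosanta_spec : Claim_equal_robosanta := by
  intro instructions _
  unfold Spec_robosanta robosanta robosanta_alt
  have hA := nodup_foldA instructions.toList [((0 : Int), (0 : Int))] (0, 0) (0, 0) true
    (List.nodup_singleton _)
  have hB : (PySem.Set.update
      (PySem.Set.update ([((0 : Int), (0 : Int))] : PySem.Set (Int × Int))
        (walk (0, 0) (evens instructions.toList)))
      (walk (0, 0) (odds instructions.toList))).Nodup :=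
    PySem.Set.nodup_update _ _ (PySem.Set.nodup_update _ _ (List.nodup_singleton _))
  have hmem : ∀ x : Int × Int,
      x ∈ (instructions.toList.foldl aBody ([((0 : Int), (0 : Int))], (0, 0), (0, 0), true)).1 ↔
      x ∈ PySem.Set.update
        (PySem.Set.update ([((0 : Int), (0 : Int))] : PySem.Set (Int × Int))
          (walk (0, 0) (evens instructions.toList)))
        (walk (0, 0) (odds instructions.toList)) := by
    intro x
    rw [mem_foldA]
    have := mem_visitedL instructions.toList (0, 0) (0, 0) true x
    simp only [if_true] at this
    simp only [this, PySem.Set.mem_update, List.mem_singleton]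
    tauto
  have hperm := (List.perm_ext_iff_of_nodup hA hB).mpr hmem
  simp [PySem.Set.len, hperm.length_eq]
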